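-- pv_equiv track=rewrite | github.com/kloseliebej/Knowledge-based-AI | Agent.py | PickHighestScore
-- ===== SOURCE A (Python) =====
-- def PickHighestScore(scores):
--     maxnum = 0
--     for i in range(8):
--         if(scores[i] > maxnum):
--             maxi = i
--             maxnum = scores[i]
--     if maxnum > 0:
--         find_another = False
--         for i in range(8):
--             if scores[i] == maxnum and maxi != i:
--                 find_another = True
--
--         if (not find_another) and (maxnum > 42):
--             return maxi + 1
--         else:
--             return -1
--     else:
--         return -1
-- ===== SOURCE B (Python) =====
-- def PickHighestScore(scores):
--     s = sorted(scores[:8])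
--     top = s[7]
--     if top > 42 and top > s[6]:
--         return scores.index(top) + 1
--     return -1
-- ===== Notes on version B (the rewrite author's own statement) =====
-- stated objective: simpler
-- what changed: A's two explicit index loops over range(8) (a running strict-max scan tracking maxi/maxnum, then a second scan for a duplicate of the maximum) are replaced by sorting the first eight scores once and comparing the two largest adjacent elements of the sorted list for uniqueness, with scores.index recovering the position.
import Mathlib
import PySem

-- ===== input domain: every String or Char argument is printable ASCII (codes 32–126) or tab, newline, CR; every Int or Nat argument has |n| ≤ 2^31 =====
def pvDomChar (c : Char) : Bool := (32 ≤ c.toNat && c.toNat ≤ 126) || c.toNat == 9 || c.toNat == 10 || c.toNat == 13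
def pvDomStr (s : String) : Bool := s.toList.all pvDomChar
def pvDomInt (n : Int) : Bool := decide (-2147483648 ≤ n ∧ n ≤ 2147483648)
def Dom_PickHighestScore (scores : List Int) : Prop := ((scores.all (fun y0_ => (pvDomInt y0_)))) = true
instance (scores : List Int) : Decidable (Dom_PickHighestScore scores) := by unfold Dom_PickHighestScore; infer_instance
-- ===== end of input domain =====

-- B replaces A's two index loops (find-max scan, then duplicate scan) by one sort of the first
-- eight scores followed by an adjacent top-two comparison; objective: simpler, not faster.

-- ===== PORT A =====
-- maxnum = 0; for i in range(8): if scores[i] > maxnum: maxi = i; maxnum = scores[i]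
-- (Python's maxi is undefined before its first assignment; it is read only when maxnum > 0,
--  by which point it has been assigned, so the initial (0, 0) below is never observed.)
def pickLoop1 (scores : List Int) : Int × Int :=
  (PySem.List.pyRange 0 8).foldl
    (fun (p : Int × Int) i =>
      if PySem.List.pyGetD scores i 0 > p.2 then (i, PySem.List.pyGetD scores i 0) else p)
    (0, 0)

-- find_another = False; for i in range(8): if scores[i] == maxnum and maxi != i: find_another = True
def pickLoop2 (scores : List Int) (maxi maxnum : Int) : Bool :=
  (PySem.List.pyRange 0 8).foldl
    (fun (b : Bool) i =>
      if PySem.List.pyGetD scores i 0 = maxnum ∧ maxi ≠ i then true else b)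
    false

def PickHighestScore (scores : List Int) : Int :=
  let st := pickLoop1 scores
  if st.2 > 0 then
    if pickLoop2 scores st.1 st.2 = false ∧ st.2 > 42 then st.1 + 1 else -1
  else -1

-- ===== PORT B =====
def PickHighestScore_alt (scores : List Int) : Int :=
  -- s = sorted(scores[:8]); top = s[7]
  let s := PySem.List.sorted (PySem.List.slice scores none (some 8)) (fun x => x) false
  let top := PySem.List.pyGetD s 7 0
  if top > 42 ∧ top > PySem.List.pyGetD s 6 0 then
    -- scores.index(top): its ValueError is impossible under Pre_ (top is drawn from scores)
    match PySem.List.index? scores top with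
    | some k => (k : Int) + 1
    | none => -1
  else -1

-- ===== PRECONDITION & SPEC =====
-- Pre_ excludes exactly the inputs with fewer than 8 scores, on which A raises IndexError.
def Pre_PickHighestScore (scores : List Int) : Prop := 8 ≤ scores.length
instance (scores : List Int) : Decidable (Pre_PickHighestScore scores) := by
  unfold Pre_PickHighestScore; infer_instance

def pvWitness_PickHighestScore : List Int := [50, 1, 2, 3, 4, 5, 6, 7]

def Spec_PickHighestScore (scores : List Int) (out : Int) : Prop := out = PickHighestScore_alt scores
instance (scores : List Int) (out : Int) : Decidable (Spec_PickHighestScore scores out) := by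
  unfold Spec_PickHighestScore; infer_instance

-- ===== CLAIM (what is proved, stated in full; the proofs are below) =====
def Claim_equal_PickHighestScore : Prop := ∀ (scores : List Int), Dom_PickHighestScore scores → Pre_PickHighestScore scores → Spec_PickHighestScore scores (PickHighestScore scores)

-- ===== LEMMAS AND PROOFS =====

-- An index loop 'for i in range(s, s+len(l)): … l[i-s] …' is a fold over enumerate(l, s).
theorem pv_fold_enum {α β : Type} (l : List α) (d : α) (g : β → Int → α → β) :
    ∀ (s : Int) (init : β),
      (PySem.List.pyRange s (s + l.length)).foldl
        (fun acc i => g acc i (PySem.List.pyGetD l (i - s) d)) init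
      = (PySem.List.enumerate l s).foldl (fun acc q => g acc q.1 q.2) init := by
  induction l with
  | nil =>
    intro s init
    rw [show ((List.nil : List α).length : Int) = 0 by simp]
    rw [PySem.List.pyRange_one_eq_nil (by omega)]
    simp [PySem.List.enumerate]
  | cons x t ih =>
    intro s init
    rw [show (((x :: t) : List α).length : Int) = (t.length : Int) + 1 by
      push_cast [List.length_cons]; ring]
    rw [PySem.List.pyRange_one_cons (by omega)]
    rw [PySem.List.enumerate_cons]
    simp only [List.foldl_cons, sub_self, PySem.List.pyGetD_zero_cons]
    rw [show s + ((t.length : Int) + 1) = (s + 1) + t.length by ring]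
    rw [PySem.List.foldl_congr_mem _ _
      (fun acc i => g acc i (PySem.List.pyGetD t (i - (s + 1)) d)) _ ?_]
    · exact ih (s + 1) (g init s x)
    · intro acc i hi
      rw [PySem.List.mem_pyRange_one] at hi
      rw [PySem.List.pyGetD_of_nonneg _ _ (by omega)]
      simp only []
      rw [PySem.List.pyGetD_of_nonneg t _ (by omega)]
      rw [show (i - s).toNat = (i - (s + 1)).toNat + 1 by omega]
      simp

-- Specialisation to s = 0, the shape A's loops take.
theorem pv_fold_enum0 {α β : Type} (l : List α) (d : α) (g : β → Int → α → β) (init : β) :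
    (PySem.List.pyRange 0 (l.length : Int)).foldl
      (fun acc i => g acc i (PySem.List.pyGetD l i d)) init
    = (PySem.List.enumerate l 0).foldl (fun acc q => g acc q.1 q.2) init := by
  have := pv_fold_enum l d g 0 init
  simpa using this

theorem pv_foldl_max_mem (t : List Int) : ∀ a : Int, t.foldl max a = a ∨ t.foldl max a ∈ t := by
  induction t with
  | nil => intro a; simp
  | cons x t ih =>
    intro a
    rw [List.foldl_cons]
    rcases ih (max a x) with h | h
    · rw [h]
      rcases le_total a x with hx | hx
      · right; simp [max_eq_right hx]
      · left; simp [max_eq_left hx]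
    · right; exact List.mem_cons_of_mem _ h

theorem pv_foldl_max_le (t : List Int) :
    ∀ a c : Int, a ≤ c → (∀ x ∈ t, x ≤ c) → t.foldl max a ≤ c := by
  intro a c ha hx
  rcases pv_foldl_max_mem t a with h | h
  · rw [h]; exact ha
  · exact hx _ h

-- A's first loop: running strict max with its index = (index of first maximum, maximum).
theorem pv_foldA (l : List Int) : ∀ (s : Int) (p : Int × Int),
    (PySem.List.enumerate l s).foldl (fun p q => if q.2 > p.2 then (q.1, q.2) else p) p
    = if p.2 < l.foldl max p.2
      then (s + (((PySem.List.index? l (l.foldl max p.2)).getD 0 : Nat) : Int), l.foldl max p.2)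
      else p := by
  induction l with
  | nil =>
    intro s p
    simp [PySem.List.enumerate]
  | cons x t ih =>
    intro s p
    rw [PySem.List.enumerate_cons, List.foldl_cons, List.foldl_cons]
    have hax := (PySem.List.le_foldl_max t x).1
    have hap := (PySem.List.le_foldl_max t p.2).1
    by_cases hx : x > p.2
    · simp only [if_pos hx]
      rw [ih (s + 1) (s, x)]
      simp only [max_eq_right (le_of_lt hx)]
      by_cases h2 : x < t.foldl max x
      · -- the true max lies in t, strictly above x
        have hmem : t.foldl max x ∈ t := by
          rcases pv_foldl_max_mem t x with h | h
          · omega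
          · exact h
        obtain ⟨k, hk⟩ := Option.isSome_iff_exists.mp ((PySem.List.index?_isSome_iff t _).mpr hmem)
        rw [if_pos h2, if_pos (by omega)]
        rw [PySem.List.index?_cons_of_ne t (by omega), hk]
        simp only [Option.map_some, Option.getD_some, Prod.mk.injEq]
        refine ⟨by push_cast; ring, trivial⟩
      · have hxe : t.foldl max x = x := le_antisymm (by omega) hax
        rw [if_neg h2, if_pos (by omega), hxe]
        rw [PySem.List.index?_cons_self]
        norm_num
    · simp only [if_neg hx]
      rw [ih (s + 1) p]
      simp only [max_eq_left (show x ≤ p.2 by omega)]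
      by_cases h2 : p.2 < t.foldl max p.2
      · have hmem : t.foldl max p.2 ∈ t := by
          rcases pv_foldl_max_mem t p.2 with h | h
          · omega
          · exact h
        obtain ⟨k, hk⟩ := Option.isSome_iff_exists.mp ((PySem.List.index?_isSome_iff t _).mpr hmem)
        rw [if_pos h2, if_pos h2]
        rw [PySem.List.index?_cons_of_ne t (by omega), hk]
        simp only [Option.map_some, Option.getD_some, Prod.mk.injEq]
        refine ⟨by push_cast; ring, trivial⟩
      · rw [if_neg h2, if_neg h2]

theorem pv_foldOr_true (P : Int × Int → Prop) [DecidablePred P] (l : List (Int × Int)) :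
    l.foldl (fun b q => if P q then true else b) true = true := by
  induction l with
  | nil => rfl
  | cons q t ih =>
    rw [List.foldl_cons]
    by_cases hq : P q
    · rw [if_pos hq]; exact ih
    · rw [if_neg hq]; exact ih

-- A's second loop: the 'found another' flag stays false iff no element satisfies the test.
theorem pv_foldOr_false_iff (P : Int × Int → Prop) [DecidablePred P] (l : List (Int × Int)) :
    (l.foldl (fun b q => if P q then true else b) false = false) ↔ ∀ q ∈ l, ¬ P q := by
  induction l with
  | nil => simp
  | cons q t ih =>
    rw [List.foldl_cons]
    by_cases hq : P q
    · rw [if_pos hq, pv_foldOr_true]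
      simp [hq]
    · rw [if_neg hq, ih]
      simp [hq]

theorem pv_mem_enumerate {α : Type} (l : List α) : ∀ (s : Int) (q : Int × α),
    q ∈ PySem.List.enumerate l s ↔ ∃ (j : Nat) (hj : j < l.length), q.1 = s + j ∧ q.2 = l[j] := by
  induction l with
  | nil => intro s q; simp [PySem.List.enumerate]
  | cons x t ih =>
    intro s q
    rw [PySem.List.enumerate_cons, List.mem_cons, ih (s + 1) q]
    constructor
    · rintro (rfl | ⟨j, hj, h1, h2⟩)
      · exact ⟨0, by simp, by simp, by simp⟩
      · exact ⟨j + 1, by simpa using hj, by push_cast; omega, by simpa using h2⟩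
    · rintro ⟨j, hj, h1, h2⟩
      match j with
      | 0 =>
        left
        obtain ⟨q1, q2⟩ := q
        simp at h1 h2 ⊢
        exact ⟨by omega, h2⟩
      | j + 1 =>
        right
        exact ⟨j, by simpa using hj, by push_cast at h1 ⊢; omega, by simpa using h2⟩

-- 'every position holding T is THE first position of T' iff T occurs exactly once.
theorem pv_unique_iff_count (l : List Int) (T : Int) (k : Nat)
    (hk : PySem.List.index? l T = some k) :
    (∀ q ∈ PySem.List.enumerate l 0, q.2 = T → (k : Int) = q.1) ↔ l.count T = 1 := by
  obtain ⟨hkl, hkv, hfirst⟩ := PySem.List.getElem_of_index?_eq_some hk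
  have hmem : T ∈ l := hkv ▸ List.getElem_mem hkl
  have hpos : 0 < l.count T := List.count_pos_iff.mpr hmem
  constructor
  · intro h
    by_contra hne
    have h2 : 2 ≤ l.count T := by omega
    obtain ⟨n, m, hnm, hn, hm⟩ :=
      List.duplicate_iff_exists_distinct_get.mp (List.duplicate_iff_two_le_count.mpr h2)
    have e1 := h ((n : Int), T) ((pv_mem_enumerate l 0 _).mpr ⟨n, n.isLt, by simp, by simpa using hn⟩) rfl
    have e2 := h ((m : Int), T) ((pv_mem_enumerate l 0 _).mpr ⟨m, m.isLt, by simp, by simpa using hm⟩) rfl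
    have : (n : Nat) = m := by omega
    omega
  · intro h1 q hq hT
    obtain ⟨j, hj, hq1, hq2⟩ := (pv_mem_enumerate l 0 q).mp hq
    have hjk : j = k := by
      by_contra hne
      have hdup : l.Duplicate T := by
        rcases Nat.lt_or_ge j k with hlt | hge
        · exact List.duplicate_iff_exists_distinct_get.mpr
            ⟨⟨j, hj⟩, ⟨k, hkl⟩, hlt, by simp [← hq2, hT], by simp [hkv]⟩
        · have hlt : k < j := by omega
          exact List.duplicate_iff_exists_distinct_get.mpr
            ⟨⟨k, hkl⟩, ⟨j, hj⟩, hlt, by simp [hkv], by simp [← hq2, hT]⟩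
      have := List.duplicate_iff_two_le_count.mp hdup
      omega
    omega

-- In a nondecreasing 8-list, the last element is unique iff it beats the second-to-last.
theorem pv_count_top (s : List Int) (h : s.length = 8) (hp : s.Pairwise (· ≤ ·)) :
    (s.count (s[7]'(by omega)) = 1) ↔ s[6]'(by omega) < s[7]'(by omega) := by
  match s, h with
  | [y0, y1, y2, y3, y4, y5, y6, y7], _ =>
    simp only [List.pairwise_cons, List.mem_cons] at hp
    simp only [List.count_cons, List.count_nil, List.getElem_cons_succ, List.getElem_cons_zero]
    have h01 : y0 ≤ y1 := by tauto
    have h12 : y1 ≤ y2 := by tauto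
    have h23 : y2 ≤ y3 := by tauto
    have h34 : y3 ≤ y4 := by tauto
    have h45 : y4 ≤ y5 := by tauto
    have h56 : y5 ≤ y6 := by tauto
    have h67 : y6 ≤ y7 := by tauto
    simp only [beq_iff_eq]
    split_ifs <;> omega

-- reading an index below 8 sees only the take-8 prefix
theorem pv_get_take (scores : List Int) (i : Int) (h0 : 0 ≤ i) (h8 : i < 8) :
    PySem.List.pyGetD scores i 0 = PySem.List.pyGetD (scores.take 8) i 0 := by
  rw [PySem.List.pyGetD_of_nonneg _ _ h0, PySem.List.pyGetD_of_nonneg _ _ h0]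
  unfold List.getD
  rw [List.getElem?_take_of_lt (by omega)]

-- Common normal form both ports are reduced to.
def pvNF (scores : List Int) : Int :=
  let l := scores.take 8
  let M := l.foldl max 0
  if M > 42 ∧ l.count M = 1
  then (((PySem.List.index? l M).getD 0 : Nat) : Int) + 1
  else -1

theorem pv_loop1_eq (scores : List Int) (h : 8 ≤ scores.length) :
    pickLoop1 scores =
      if 0 < (scores.take 8).foldl max 0
      then ((((PySem.List.index? (scores.take 8) ((scores.take 8).foldl max 0)).getD 0 : Nat) : Int),
            (scores.take 8).foldl max 0)
      else (0, 0) := by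
  have hl : (scores.take 8).length = 8 := by simp; omega
  unfold pickLoop1
  rw [show (8:Int) = ((scores.take 8).length : Int) by rw [hl]; norm_num]
  rw [PySem.List.foldl_congr_mem _ _
    (fun (p : Int × Int) i =>
      if PySem.List.pyGetD (scores.take 8) i 0 > p.2
      then (i, PySem.List.pyGetD (scores.take 8) i 0) else p) _ ?_]
  · rw [pv_fold_enum0 (scores.take 8) 0
      (fun (p : Int × Int) (i : Int) (v : Int) => if v > p.2 then (i, v) else p) (0, 0)]
    rw [pv_foldA]
    simp
  · intro acc i hi
    rw [PySem.List.mem_pyRange_one] at hi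
    rw [hl] at hi
    simp only []
    rw [pv_get_take scores i (by omega) (by omega)]

theorem pv_loop2_eq (scores : List Int) (h : 8 ≤ scores.length) (mi mn : Int) :
    (pickLoop2 scores mi mn = false) ↔
      ∀ q ∈ PySem.List.enumerate (scores.take 8) 0, ¬ (q.2 = mn ∧ mi ≠ q.1) := by
  have hl : (scores.take 8).length = 8 := by simp; omega
  unfold pickLoop2
  rw [show (8:Int) = ((scores.take 8).length : Int) by rw [hl]; norm_num]
  rw [PySem.List.foldl_congr_mem _ _
    (fun (b : Bool) i =>
      if PySem.List.pyGetD (scores.take 8) i 0 = mn ∧ mi ≠ i then true else b) _ ?_]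
  · rw [pv_fold_enum0 (scores.take 8) 0
      (fun (b : Bool) (i : Int) (v : Int) => if v = mn ∧ mi ≠ i then true else b) false]
    exact pv_foldOr_false_iff (fun q => q.2 = mn ∧ mi ≠ q.1) _
  · intro acc i hi
    rw [PySem.List.mem_pyRange_one] at hi
    rw [hl] at hi
    simp only []
    rw [pv_get_take scores i (by omega) (by omega)]

theorem pv_A_eq (scores : List Int) (h : 8 ≤ scores.length) :
    PickHighestScore scores = pvNF scores := by
  unfold PickHighestScore pvNF
  rw [pv_loop1_eq scores h]
  set l := scores.take 8
  set M := l.foldl max 0 with hM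
  by_cases h0 : 0 < M
  · rw [if_pos h0]
    simp only [if_pos h0]
    have hmem : M ∈ l := by
      rcases pv_foldl_max_mem l 0 with hh | hh
      · rw [hM] at h0; omega
      · exact hh
    obtain ⟨k, hk⟩ := Option.isSome_iff_exists.mp ((PySem.List.index?_isSome_iff l M).mpr hmem)
    simp only [hk, Option.getD_some]
    have huniq := pv_unique_iff_count l M k hk
    by_cases hcnt : l.count M = 1
    · have hfa : pickLoop2 scores (k : Int) M = false := by
        rw [pv_loop2_eq scores h]
        intro q hq
        rw [not_and, not_ne_iff]
        intro hqv
        exact (huniq.mpr hcnt q hq hqv)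
      by_cases h42 : M > 42
      · rw [if_pos ⟨hfa, h42⟩, if_pos ⟨h42, hcnt⟩, ← hM, hk]
        simp
      · rw [if_neg (by tauto), if_neg (by tauto)]
    · have hfa : ¬ (pickLoop2 scores (k : Int) M = false) := by
        rw [pv_loop2_eq scores h]
        intro hall
        exact hcnt (huniq.mp (fun q hq hqv => by
          have := hall q hq
          rw [not_and, not_ne_iff] at this
          exact this hqv))
      rw [if_neg (by tauto), if_neg (by tauto)]
  · rw [if_neg h0]
    simp only
    rw [if_neg (by omega), if_neg (by rw [hM] at h0; omega)]

theorem pv_B_eq (scores : List Int) (h : 8 ≤ scores.length) :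
    PickHighestScore_alt scores = pvNF scores := by
  simp only [PickHighestScore_alt, pvNF]
  rw [PySem.List.slice_to scores (by norm_num), show ((8:Int)).toNat = 8 by decide]
  set l := scores.take 8 with hldef
  have hl : l.length = 8 := by rw [hldef]; simp; omega
  set s := PySem.List.sorted l (fun x => x) false with hsdef
  have hsl : s.length = 8 := by rw [hsdef, PySem.List.length_sorted, hl]
  have h7 : 7 < s.length := by omega
  have h6 : 6 < s.length := by omega
  have hperm : s.Perm l := PySem.List.sorted_perm l _ false
  have hpw : s.Pairwise (· ≤ ·) := PySem.List.sorted_pairwise l (fun x => x)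
  have htop : PySem.List.pyGetD s 7 0 = s[7]'h7 := by
    rw [PySem.List.pyGetD_eq_getElem _ _ (by omega) (by omega)]
    simp only [show Int.toNat 7 = 7 by decide]
  have hsec : PySem.List.pyGetD s 6 0 = s[6]'h6 := by
    rw [PySem.List.pyGetD_eq_getElem _ _ (by omega) (by omega)]
    simp only [show Int.toNat 6 = 6 by decide]
  rw [htop, hsec]
  have hmax : ∀ y ∈ l, y ≤ s[7]'h7 := by
    intro y hy
    obtain ⟨j, hj, rfl⟩ := List.mem_iff_getElem.mp (hperm.mem_iff.mpr hy)
    exact PySem.List.key_sorted_getElem_mono l (fun x => x) (p := j) (q := 7) (by omega) (by omega)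
  have htopmem : s[7]'h7 ∈ l := hperm.mem_iff.mp (List.getElem_mem _)
  have hM : l.foldl max 0 = max (0:Int) (s[7]'h7) := by
    apply le_antisymm
    · exact pv_foldl_max_le l 0 _ (le_max_left _ _)
        (fun x hx => le_trans (hmax x hx) (le_max_right _ _))
    · exact max_le (PySem.List.le_foldl_max l 0).1 ((PySem.List.le_foldl_max l 0).2 _ htopmem)
  have hcnt_iff : (List.count (s[7]'h7) l = 1) ↔ s[6]'h6 < s[7]'h7 := by
    rw [← hperm.count_eq]
    exact pv_count_top s hsl hpw
  by_cases hc : s[7]'h7 > 42 ∧ s[7]'h7 > s[6]'h6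
  · have hTM : l.foldl max 0 = s[7]'h7 := by
      rw [hM, max_eq_right (by omega)]
    rw [if_pos hc, if_pos (by rw [hTM]; exact ⟨hc.1, hcnt_iff.mpr hc.2⟩)]
    have hidx : PySem.List.index? scores (s[7]'h7) = PySem.List.index? l (s[7]'h7) := by
      conv_lhs => rw [← List.take_append_drop 8 scores]
      exact PySem.List.index?_append_of_mem _ htopmem
    obtain ⟨k, hk⟩ := Option.isSome_iff_exists.mp
      ((PySem.List.index?_isSome_iff l _).mpr htopmem)
    rw [hidx, hk, hTM, hk]
    simp
  · rw [if_neg hc]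
    have hneg : ¬ (l.foldl max 0 > 42 ∧ List.count (l.foldl max 0) l = 1) := by
      rintro ⟨h42, hcnt⟩
      have hTM : l.foldl max 0 = s[7]'h7 := by
        rcases max_cases (0:Int) (s[7]'h7) with ⟨he, _⟩ | ⟨he, _⟩
        · rw [hM, he] at h42; omega
        · rw [hM, he]
      rw [hTM] at hcnt
      exact hc ⟨by omega, hcnt_iff.mp hcnt⟩
    rw [if_neg hneg]

-- ===== VERDICT (by name: the statement is the Claim_ definition above) =====
theorem PickHighestScore_spec : Claim_equal_PickHighestScore := by
  intro scores _ hpre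
  show PickHighestScore scores = PickHighestScore_alt scores
  rw [pv_A_eq scores hpre, pv_B_eq scores hpre]
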